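-- pv_equiv track=rewrite | github.com/tusharrao198/CP_practice | dynamicProgramming/EqualAveragePartition.py | make_ans
-- ===== SOURCE A (Python) =====
-- from collections import Counter
--
-- def make_ans(f, a):
--     cf = Counter(f)
--     for x in a:
--         cf[x] -= 1
--     b = []
--     for k, v in cf.items():
--         b += [k] * v
--     b.sort()
--     return [a, b]
-- ===== SOURCE B (Python) =====
-- from collections import Counter
--
-- def make_ans(f, a):
--     ca = Counter(a)
--     b = []
--     for x in f:
--         if ca[x] > 0:
--             ca[x] -= 1
--         else:
--             b.append(x)
--     b.sort()
--     return [a, b]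
-- ===== Notes on version B (the rewrite author's own statement) =====
-- stated objective: alternative
-- what changed: B scans f once with a credit counter built from a (skip x while its credit lasts, else keep it) and sorts the kept elements, instead of decrementing a Counter of f by a and re-expanding every remaining count with list-replication.
import Mathlib
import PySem

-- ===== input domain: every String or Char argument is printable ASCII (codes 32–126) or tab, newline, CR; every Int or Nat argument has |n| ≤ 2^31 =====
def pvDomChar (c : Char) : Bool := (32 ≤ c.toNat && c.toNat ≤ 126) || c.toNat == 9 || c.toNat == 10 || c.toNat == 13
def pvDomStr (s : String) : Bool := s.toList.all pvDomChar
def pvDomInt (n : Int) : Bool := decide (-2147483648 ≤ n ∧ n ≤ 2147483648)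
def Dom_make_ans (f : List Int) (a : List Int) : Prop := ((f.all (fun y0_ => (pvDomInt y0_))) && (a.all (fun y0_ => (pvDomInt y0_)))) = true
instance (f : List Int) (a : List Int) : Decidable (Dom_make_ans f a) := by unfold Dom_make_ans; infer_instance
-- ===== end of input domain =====

-- B filters f in one pass against a credit counter of a instead of expanding a decremented Counter of f; same cost, different decomposition.

-- ===== PORT A =====
def make_ans (f : List Int) (a : List Int) : List (List Int) :=
  let cf := PySem.Dict.counter f
  let cf := a.foldl (fun d x => d.modify x 0 (· - 1)) cf
  let b := cf.items.foldl (fun b kv => b ++ List.replicate kv.2.toNat kv.1) []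
  [a, PySem.List.sorted b (fun x => x) false]

-- ===== PORT B =====
def make_ans_alt (f : List Int) (a : List Int) : List (List Int) :=
  let ca := PySem.Dict.counter a
  let s := f.foldl (fun (s : PySem.Dict Int Int × List Int) x =>
      if s.1.getD x 0 > 0 then (s.1.insert x (s.1.getD x 0 - 1), s.2)
      else (s.1, s.2 ++ [x])) (ca, [])
  [a, PySem.List.sorted s.2 (fun x => x) false]

-- ===== PRECONDITION & SPEC =====
def Spec_make_ans (f : List Int) (a : List Int) (out : List (List Int)) : Prop := out = make_ans_alt f a
instance (f : List Int) (a : List Int) (out : List (List Int)) : Decidable (Spec_make_ans f a out) := by unfold Spec_make_ans; infer_instance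

-- ===== CLAIM (what is proved, stated in full; the proofs are below) =====
def Claim_equal_make_ans : Prop := ∀ (f : List Int) (a : List Int), Dom_make_ans f a → Spec_make_ans f a (make_ans f a)

-- ===== LEMMAS AND PROOFS =====

-- the decrement loop: getD after the fold
theorem getD_foldl_modify_sub (l : List Int) (d : PySem.Dict Int Int) (z : Int) :
    (l.foldl (fun d x => d.modify x 0 (· - 1)) d).getD z 0 = d.getD z 0 - l.count z := by
  induction l generalizing d with
  | nil => simp
  | cons x t ih =>
    simp only [List.foldl_cons, ih, PySem.Dict.getD_modify, List.count_cons]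
    by_cases h : z = x <;> simp [h] <;> omega

-- B's loop invariant for the count of one value z
theorem B_count (z : Int) (l : List Int) (d : PySem.Dict Int Int) (b : List Int) :
    ((l.foldl (fun (s : PySem.Dict Int Int × List Int) x =>
        if s.1.getD x 0 > 0 then (s.1.insert x (s.1.getD x 0 - 1), s.2)
        else (s.1, s.2 ++ [x])) (d, b)).2).count z
      = b.count z + ((l.count z : Int) - ((d.getD z 0).toNat : Int)).toNat := by
  induction l generalizing d b with
  | nil => simp
  | cons x t ih =>
    simp only [List.foldl_cons]
    by_cases hx : (d.getD x 0) > 0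
    · rw [if_pos hx, ih]
      by_cases h : z = x
      · subst h
        rw [PySem.Dict.getD_insert_self]
        simp only [List.count_cons_self]
        omega
      · rw [PySem.Dict.getD_insert_of_ne _ _ _ h]
        have h' : ¬ x = z := fun e => h e.symm
        simp [h']
    · rw [if_neg hx, ih]
      by_cases h : z = x
      · subst h
        simp only [List.count_append, List.count_cons_self, List.count_nil]
        omega
      · have h' : ¬ x = z := fun e => h e.symm
        simp [h']

-- A's expansion loop: count of z
theorem A_count_aux (z : Int) (l : List (Int × Int)) (init : List Int) :
    (l.foldl (fun b kv => b ++ List.replicate kv.2.toNat kv.1) init).count z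
      = init.count z + (l.map (fun kv => if kv.1 = z then kv.2.toNat else 0)).sum := by
  induction l generalizing init with
  | nil => simp
  | cons kv t ih =>
    simp only [List.foldl_cons, ih, List.map_cons, List.sum_cons, List.count_append,
      List.count_replicate]
    by_cases h : kv.1 = z
    · simp [h]; omega
    · have h' : ¬ z = kv.1 := fun e => h e.symm
      simp [h, h']

theorem sum_if_of_nodup (z : Int) (g : Int → Nat) (ks : List Int) (hnd : ks.Nodup) :
    (ks.map (fun k => if k = z then g k else 0)).sum = if z ∈ ks then g z else 0 := by
  induction ks with
  | nil => simp
  | cons k t ih =>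
    simp only [List.nodup_cons] at hnd
    simp only [List.map_cons, List.sum_cons, ih hnd.2, List.mem_cons]
    by_cases h : k = z
    · subst h
      simp [hnd.1]
    · have h' : ¬ z = k := fun e => h e.symm
      simp [h, h']

theorem mem_keys_foldl_modify (l : List Int) (d : PySem.Dict Int Int) (z : Int) :
    z ∈ (l.foldl (fun d x => d.modify x 0 (· - 1)) d).keys ↔ z ∈ d.keys ∨ z ∈ l := by
  induction l generalizing d with
  | nil => simp
  | cons x t ih =>
    simp only [List.foldl_cons, ih, PySem.Dict.keys_modify,
      PySem.Dict.mem_keys_insert, List.mem_cons]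
    tauto

-- the two intermediate lists have the same element counts
theorem counts_agree (f a : List Int) (z : Int) :
    (((PySem.Dict.counter f |> (fun cf => a.foldl (fun d x => d.modify x 0 (· - 1)) cf)).items).foldl
        (fun b kv => b ++ List.replicate kv.2.toNat kv.1) []).count z
      = ((f.foldl (fun (s : PySem.Dict Int Int × List Int) x =>
            if s.1.getD x 0 > 0 then (s.1.insert x (s.1.getD x 0 - 1), s.2)
            else (s.1, s.2 ++ [x])) (PySem.Dict.counter a, [])).2).count z := by
  set cf2 := a.foldl (fun d x => d.modify x 0 (· - 1)) (PySem.Dict.counter f) with hcf2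
  have hnd : cf2.keys.Nodup :=
    PySem.Dict.nodup_keys_foldl_modify_key a (fun x => x) 0 (fun _ _ v => v - 1)
      (PySem.Dict.counter f) (PySem.Dict.nodup_keys_counter f)
  have hval : cf2.getD z 0 = (f.count z : Int) - (a.count z : Int) := by
    rw [hcf2, getD_foldl_modify_sub, PySem.Dict.getD_counter]
  have hB : ((f.foldl (fun (s : PySem.Dict Int Int × List Int) x =>
            if s.1.getD x 0 > 0 then (s.1.insert x (s.1.getD x 0 - 1), s.2)
            else (s.1, s.2 ++ [x])) (PySem.Dict.counter a, [])).2).count z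
      = ((f.count z : Int) - (a.count z : Int)).toNat := by
    rw [B_count, PySem.Dict.getD_counter]
    simp
  rw [hB, A_count_aux]
  rw [PySem.Dict.items_eq_map_keys cf2 hnd 0, List.map_map]
  have hmap : ((fun kv : Int × Int => if kv.1 = z then kv.2.toNat else 0) ∘
      fun k => (k, cf2.getD k 0)) = fun k => if k = z then (cf2.getD k 0).toNat else 0 := by
    funext k
    by_cases h : k = z <;> simp [h]
  rw [hmap, sum_if_of_nodup z (fun k => (cf2.getD k 0).toNat) cf2.keys hnd]
  by_cases hz : z ∈ cf2.keys
  · rw [if_pos hz, hval]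
    simp
  · rw [if_neg hz]
    have hzf : z ∉ f := by
      intro hmem
      exact hz ((mem_keys_foldl_modify a (PySem.Dict.counter f) z).mpr
        (Or.inl (by rw [PySem.Dict.keys_counter]; exact (PySem.Set.mem_ofList f z).mpr hmem)))
    have : f.count z = 0 := List.count_eq_zero.mpr hzf
    simp only [this, Nat.cast_zero, List.count_nil]
    omega

theorem make_ans_eq (f a : List Int) : make_ans f a = make_ans_alt f a := by
  unfold make_ans make_ans_alt
  simp only [List.cons.injEq, and_true, true_and]
  rw [PySem.List.sorted_id_eq_sorted_id_iff_perm]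
  rw [List.perm_iff_count]
  intro z
  exact counts_agree f a z

-- ===== VERDICT (by name: the statement is the Claim_ definition above) =====
theorem make_ans_spec : Claim_equal_make_ans := by
  intro f a _
  unfold Spec_make_ans
  exact make_ans_eq f a
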